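-- pv_equiv track=rewrite | github.com/websitetalkingheadsvideo/ValleyByNight | tools/repeatable/python/api-tools/download_envato_images.py | get_size_priority
-- ===== SOURCE A (Python) =====
-- def get_size_priority(size_key: str, preview_type: str) -> int:
--     """Get priority score for image size (higher = larger/better)
--
--     Returns priority score where:
--     - 100+ = Very large (full, huge, original)
--     - 80-99 = Large
--     - 60-79 = Medium-large
--     - 40-59 = Medium
--     - 20-39 = Small-medium
--     - 0-19 = Small/thumbnail
--     """
--     key_lower = size_key.lower()
--     type_lower = preview_type.lower()
--
--     # Very large sizes (priority 100+)
--     if any(term in key_lower for term in ['full', 'original', 'huge', 'max', 'maximum']):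
--         return 100
--     if any(term in type_lower for term in ['full', 'original', 'huge']):
--         return 95
--
--     # Large sizes (priority 80-99)
--     if any(term in key_lower for term in ['large', 'big', 'xl', 'xxl']):
--         return 85
--     if any(term in type_lower for term in ['large', 'big', 'landscape']):
--         return 80
--
--     # Medium-large (priority 60-79)
--     if any(term in key_lower for term in ['medium_large', 'med_large', 'l']):
--         return 70
--     if any(term in type_lower for term in ['square', 'preview']):
--         return 65
--
--     # Medium (priority 40-59)
--     if 'medium' in key_lower or 'med' in key_lower:
--         return 50
--     if 'medium' in type_lower:
--         return 45
--
--     # Small-medium (priority 20-39)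
--     if any(term in key_lower for term in ['small', 's']):
--         return 30
--     if 'small' in type_lower:
--         return 25
--
--     # Small/thumbnail (priority 0-19)
--     if any(term in key_lower for term in ['thumb', 'icon', 'tiny']):
--         return 10
--     if any(term in type_lower for term in ['thumb', 'icon']):
--         return 5
--
--     # Default for unknown sizes - assume medium
--     return 50
-- ===== SOURCE B (Python) =====
-- # B: order-independent aggregation — evaluate ALL classification checks, then
-- # return the MAXIMUM matched score (default 50 if none match). Correct because
-- # the scores along A's ladder are strictly decreasing, so first match = max match.
-- def get_size_priority(size_key: str, preview_type: str) -> int: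
--     k = size_key.lower()
--     t = preview_type.lower()
--     checks = [
--         (any(w in k for w in ('full', 'original', 'huge', 'max', 'maximum')), 100),
--         (any(w in t for w in ('full', 'original', 'huge')), 95),
--         (any(w in k for w in ('large', 'big', 'xl', 'xxl')), 85),
--         (any(w in t for w in ('large', 'big', 'landscape')), 80),
--         (any(w in k for w in ('medium_large', 'med_large', 'l')), 70),
--         (any(w in t for w in ('square', 'preview')), 65),
--         ('medium' in k or 'med' in k, 50),
--         ('medium' in t, 45),
--         (any(w in k for w in ('small', 's')), 30),
--         ('small' in t, 25),
--         (any(w in k for w in ('thumb', 'icon', 'tiny')), 10),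
--         (any(w in t for w in ('thumb', 'icon')), 5),
--     ]
--     scores = [s for ok, s in checks if ok]
--     return max(scores) if scores else 50
-- ===== Notes on version B (the rewrite author's own statement) =====
-- stated objective: alternative
-- what changed: Replaced the ordered first-match if-ladder (early return) with an order-independent aggregation: evaluate every classification check, collect all matched scores, and return their maximum (default 50), correct because A's ladder scores are strictly decreasing.
import Mathlib
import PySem

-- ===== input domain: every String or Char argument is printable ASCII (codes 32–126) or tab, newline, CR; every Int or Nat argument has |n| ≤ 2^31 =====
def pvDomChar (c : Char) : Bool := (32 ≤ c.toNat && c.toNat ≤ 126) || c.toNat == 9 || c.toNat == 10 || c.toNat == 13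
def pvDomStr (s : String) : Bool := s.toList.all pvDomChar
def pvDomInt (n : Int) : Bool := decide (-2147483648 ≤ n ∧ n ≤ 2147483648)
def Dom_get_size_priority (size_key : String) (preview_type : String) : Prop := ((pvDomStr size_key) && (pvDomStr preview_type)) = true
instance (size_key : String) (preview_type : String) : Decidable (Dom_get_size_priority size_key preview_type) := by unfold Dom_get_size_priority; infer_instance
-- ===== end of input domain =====

-- B replaces A's ordered first-match if-ladder by an order-independent aggregation:
-- evaluate all checks, collect matched scores, return their maximum (default 50).

-- ===== PORT A =====
def get_size_priority (size_key : String) (preview_type : String) : Int :=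
  let key_lower := PySem.Str.lower size_key
  let type_lower := PySem.Str.lower preview_type
  if (["full", "original", "huge", "max", "maximum"].any (fun term => PySem.Str.isIn term key_lower)) then 100
  else if (["full", "original", "huge"].any (fun term => PySem.Str.isIn term type_lower)) then 95
  else if (["large", "big", "xl", "xxl"].any (fun term => PySem.Str.isIn term key_lower)) then 85
  else if (["large", "big", "landscape"].any (fun term => PySem.Str.isIn term type_lower)) then 80
  else if (["medium_large", "med_large", "l"].any (fun term => PySem.Str.isIn term key_lower)) then 70
  else if (["square", "preview"].any (fun term => PySem.Str.isIn term type_lower)) then 65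
  else if (PySem.Str.isIn "medium" key_lower || PySem.Str.isIn "med" key_lower) then 50
  else if (PySem.Str.isIn "medium" type_lower) then 45
  else if (["small", "s"].any (fun term => PySem.Str.isIn term key_lower)) then 30
  else if (PySem.Str.isIn "small" type_lower) then 25
  else if (["thumb", "icon", "tiny"].any (fun term => PySem.Str.isIn term key_lower)) then 10
  else if (["thumb", "icon"].any (fun term => PySem.Str.isIn term type_lower)) then 5
  else 50

-- ===== PORT B =====
def get_size_priority_alt (size_key : String) (preview_type : String) : Int :=
  let k := PySem.Str.lower size_key
  let t := PySem.Str.lower preview_type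
  let checks : List (Bool × Int) :=
    [ (["full", "original", "huge", "max", "maximum"].any (fun w => PySem.Str.isIn w k), 100),
      (["full", "original", "huge"].any (fun w => PySem.Str.isIn w t), 95),
      (["large", "big", "xl", "xxl"].any (fun w => PySem.Str.isIn w k), 85),
      (["large", "big", "landscape"].any (fun w => PySem.Str.isIn w t), 80),
      (["medium_large", "med_large", "l"].any (fun w => PySem.Str.isIn w k), 70),
      (["square", "preview"].any (fun w => PySem.Str.isIn w t), 65),
      (PySem.Str.isIn "medium" k || PySem.Str.isIn "med" k, 50),
      (PySem.Str.isIn "medium" t, 45),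
      (["small", "s"].any (fun w => PySem.Str.isIn w k), 30),
      (PySem.Str.isIn "small" t, 25),
      (["thumb", "icon", "tiny"].any (fun w => PySem.Str.isIn w k), 10),
      (["thumb", "icon"].any (fun w => PySem.Str.isIn w t), 5) ]
  let scores := (checks.filter (fun p => p.1)).map (fun p => p.2)
  match PySem.List.max? scores (fun x => x) with
  | some m => m
  | none => 50

-- ===== PRECONDITION & SPEC =====
def Spec_get_size_priority (size_key : String) (preview_type : String) (out : Int) : Prop := out = get_size_priority_alt size_key preview_type
instance (size_key : String) (preview_type : String) (out : Int) : Decidable (Spec_get_size_priority size_key preview_type out) := by unfold Spec_get_size_priority; infer_instance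

-- ===== CLAIM =====
def Claim_equal_get_size_priority : Prop := ∀ (size_key : String) (preview_type : String), Dom_get_size_priority size_key preview_type → Spec_get_size_priority size_key preview_type (get_size_priority size_key preview_type)

-- ===== LEMMAS AND PROOFS =====

-- ===== VERDICT =====
theorem get_size_priority_spec : Claim_equal_get_size_priority := by
  intro size_key preview_type _
  unfold Spec_get_size_priority get_size_priority get_size_priority_alt
  dsimp only
  generalize (["full", "original", "huge", "max", "maximum"].any
      (fun w => PySem.Str.isIn w (PySem.Str.lower size_key))) = b1
  generalize (["full", "original", "huge"].any
      (fun w => PySem.Str.isIn w (PySem.Str.lower preview_type))) = b2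
  generalize (["large", "big", "xl", "xxl"].any
      (fun w => PySem.Str.isIn w (PySem.Str.lower size_key))) = b3
  generalize (["large", "big", "landscape"].any
      (fun w => PySem.Str.isIn w (PySem.Str.lower preview_type))) = b4
  generalize (["medium_large", "med_large", "l"].any
      (fun w => PySem.Str.isIn w (PySem.Str.lower size_key))) = b5
  generalize (["square", "preview"].any
      (fun w => PySem.Str.isIn w (PySem.Str.lower preview_type))) = b6
  generalize (PySem.Str.isIn "medium" (PySem.Str.lower size_key) ||
      PySem.Str.isIn "med" (PySem.Str.lower size_key)) = b7
  generalize (PySem.Str.isIn "medium" (PySem.Str.lower preview_type)) = b8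
  generalize (["small", "s"].any
      (fun w => PySem.Str.isIn w (PySem.Str.lower size_key))) = b9
  generalize (PySem.Str.isIn "small" (PySem.Str.lower preview_type)) = b10
  generalize (["thumb", "icon", "tiny"].any
      (fun w => PySem.Str.isIn w (PySem.Str.lower size_key))) = b11
  generalize (["thumb", "icon"].any
      (fun w => PySem.Str.isIn w (PySem.Str.lower preview_type))) = b12
  revert b1 b2 b3 b4 b5 b6 b7 b8 b9 b10 b11 b12
  decide
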